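-- pv_equiv track=rewrite | github.com/canozo/aoc17 | day04/main.py | check_valids
-- ===== SOURCE A (Python) =====
-- def check_valids(text):
--     valids = 0
--     for line in text:
--         flag = True
--         words = []
--         for word in line.split(' '):
--             if word in words:
--                 flag = False
--                 break
--             else:
--                 words.append(word)
--         if flag:
--             valids += 1
--     return valids
-- ===== SOURCE B (Python) =====
-- def check_valids(text):
--     return sum(1 for line in text
--                if len(line.split(' ')) == len(set(line.split(' '))))
-- ===== Notes on version B (the rewrite author's own statement) =====
-- stated objective: simpler
-- what changed: Replaced the inner word-by-word scan with flag/break and an accumulated seen-list by a single per-line set-cardinality comparison inside one sum comprehension.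
import Mathlib
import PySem

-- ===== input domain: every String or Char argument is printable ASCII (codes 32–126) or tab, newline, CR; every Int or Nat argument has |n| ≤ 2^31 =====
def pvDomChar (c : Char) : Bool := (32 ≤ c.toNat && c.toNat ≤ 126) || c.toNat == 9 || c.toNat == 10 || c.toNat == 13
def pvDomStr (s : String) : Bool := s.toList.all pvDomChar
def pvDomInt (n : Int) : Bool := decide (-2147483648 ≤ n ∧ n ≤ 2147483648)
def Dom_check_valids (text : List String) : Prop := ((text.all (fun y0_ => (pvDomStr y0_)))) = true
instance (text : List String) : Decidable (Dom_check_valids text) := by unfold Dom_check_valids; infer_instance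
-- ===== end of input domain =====

-- B replaces A's inner duplicate-scan loop with a per-line set-cardinality comparison (simpler).


-- ===== PORT A =====
-- line.split(' ') (sep is the literal nonempty " ", so split? always returns some)
def splitSpace (s : String) : List String := (PySem.Str.split? s " ").getD []

-- inner 'for word in line.split(' ')' loop of A, with its 'words' accumulator and break
def checkLineA : List String → List String → Bool
  | [], _ => true
  | w :: rest, words => if words.contains w then false else checkLineA rest (words ++ [w])

def check_valids (text : List String) : Int :=
  text.foldl (fun valids line =>
    if checkLineA (splitSpace line) [] then valids + 1 else valids) 0

-- ===== PORT B =====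
def check_valids_alt (text : List String) : Int :=
  text.foldl (fun acc line =>
    let ws := splitSpace line
    acc + (if ws.length = (PySem.Set.ofList ws).length then 1 else 0)) 0

-- ===== PRECONDITION & SPEC =====
def Spec_check_valids (text : List String) (out : Int) : Prop := out = check_valids_alt text
instance (text : List String) (out : Int) : Decidable (Spec_check_valids text out) := by unfold Spec_check_valids; infer_instance

-- ===== CLAIM (what is proved, stated in full; the proofs are below) =====
def Claim_equal_check_valids : Prop := ∀ (text : List String), Dom_check_valids text → Spec_check_valids text (check_valids text)

-- ===== LEMMAS AND PROOFS =====

theorem checkLineA_iff (ws : List String) : ∀ (words : List String),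
    checkLineA ws words = true ↔ ws.Nodup ∧ ∀ w ∈ ws, w ∉ words := by
  induction ws with
  | nil => intro words; simp [checkLineA]
  | cons w rest ih =>
    intro words
    simp only [checkLineA]
    by_cases h : w ∈ words
    · rw [if_pos (by simpa using h)]
      simp only [Bool.false_eq_true, false_iff]
      rintro ⟨-, hall⟩
      exact hall w (List.mem_cons_self ..) h
    · rw [if_neg (by simpa using h), ih]
      constructor
      · rintro ⟨hnd, hall⟩
        refine ⟨List.nodup_cons.mpr ⟨fun hm => ?_, hnd⟩, ?_⟩
        · exact hall w hm (by simp)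
        · intro x hx
          rcases List.mem_cons.mp hx with rfl | hx
          · exact h
          · intro hw; exact hall x hx (by simp [hw])
      · rintro ⟨hnd, hall⟩
        rcases List.nodup_cons.mp hnd with ⟨hwn, hnd'⟩
        refine ⟨hnd', fun x hx hm => ?_⟩
        rcases List.mem_append.mp hm with hm | hm
        · exact hall x (List.mem_cons_of_mem _ hx) hm
        · simp at hm; subst hm; exact hwn hx

theorem len_ofList_eq_iff (xs : List String) :
    xs.length = (PySem.Set.ofList xs).length ↔ xs.Nodup := by
  constructor
  · intro h
    have hperm : (PySem.Set.ofList xs).Perm xs.dedup := by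
      rw [List.perm_ext_iff_of_nodup (PySem.Set.nodup_ofList _) (List.nodup_dedup xs)]
      intro a; simp [PySem.Set.mem_ofList, List.mem_dedup]
    have hlen : xs.dedup.length = xs.length := by
      rw [← hperm.length_eq, ← h]
    have : xs.dedup = xs := (List.dedup_sublist xs).eq_of_length hlen
    rw [← this]; exact List.nodup_dedup xs
  · intro h; rw [PySem.Set.ofList_eq_self_of_nodup _ h]

theorem fold_eq (text : List String) : ∀ (acc : Int),
    text.foldl (fun valids line =>
      if checkLineA (splitSpace line) [] then valids + 1 else valids) acc
    = text.foldl (fun acc line =>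
        let ws := splitSpace line
        acc + (if ws.length = (PySem.Set.ofList ws).length then 1 else 0)) acc := by
  induction text with
  | nil => intro acc; rfl
  | cons line rest ih =>
    intro acc
    simp only [List.foldl_cons]
    rw [ih]
    congr 1
    by_cases h : (splitSpace line).Nodup
    · rw [if_pos ((checkLineA_iff _ _).mpr ⟨h, by simp⟩),
        if_pos ((len_ofList_eq_iff _).mpr h)]
    · rw [if_neg (fun hc => h ((checkLineA_iff _ _).mp hc).1),
        if_neg (fun hc => h ((len_ofList_eq_iff _).mp hc)), add_zero]

-- ===== VERDICT (by name: the statement is the Claim_ definition above) =====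
theorem check_valids_spec : Claim_equal_check_valids := by
  intro text _
  unfold Spec_check_valids check_valids check_valids_alt
  exact fold_eq text 0
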